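-- pv_equiv track=rewrite | github.com/opendp/opendp | python/src/opendp/extrinsics/_proven.py | _split_docstring
-- ===== SOURCE A (Python) =====
-- def _split_docstring(docstring):
--     """Split a docstring into a description and a list of parameters."""
--     description = []
--     params = []
--     found_param = False
--     for line in docstring:
--         found_param |= line.startswith(":")
--         if found_param:
--             params.append(line)
--         else:
--             description.append(line)
--     return description, params
-- ===== SOURCE B (Python) =====
-- def _split_docstring(docstring):
--     """Split a docstring into a description and a list of parameters."""
--     docstring = list(docstring)
--     i = next((j for j, line in enumerate(docstring) if line.startswith(":")),
--              len(docstring))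
--     return docstring[:i], docstring[i:]
-- ===== Notes on version B (the rewrite author's own statement) =====
-- stated objective: simpler
-- what changed: Replaces the accumulating pass with a running found_param flag and per-line appends by finding the index of the first ':'-line and returning the two slices around it.
import Mathlib
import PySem

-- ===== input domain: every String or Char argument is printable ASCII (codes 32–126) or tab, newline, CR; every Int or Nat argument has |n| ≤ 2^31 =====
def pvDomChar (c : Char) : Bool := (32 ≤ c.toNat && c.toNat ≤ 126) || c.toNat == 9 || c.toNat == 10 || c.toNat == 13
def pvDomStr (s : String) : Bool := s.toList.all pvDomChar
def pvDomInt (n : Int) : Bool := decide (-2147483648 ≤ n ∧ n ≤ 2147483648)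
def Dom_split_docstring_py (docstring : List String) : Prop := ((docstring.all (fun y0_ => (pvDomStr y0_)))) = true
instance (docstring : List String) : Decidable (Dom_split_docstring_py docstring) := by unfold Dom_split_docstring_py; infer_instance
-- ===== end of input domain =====

-- B finds the first ':'-line index and slices there, instead of A's running flag with per-line appends; objective: simpler.

-- ===== PORT A =====
-- state: (description, params, found_param)
def split_docstring_py (docstring : List String) : List String × List String :=
  let s := docstring.foldl
    (fun (st : List String × List String × Bool) line =>
      let found := st.2.2 || PySem.Str.startswith line ":"
      if found then (st.1, st.2.1 ++ [line], found)
      else (st.1 ++ [line], st.2.1, found))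
    ([], [], false)
  (s.1, s.2.1)

-- ===== PORT B =====
def split_docstring_py_alt (docstring : List String) : List String × List String :=
  let i := docstring.findIdx (fun line => PySem.Str.startswith line ":")
  (docstring.take i, docstring.drop i)

-- ===== PRECONDITION & SPEC =====
def Spec_split_docstring_py (docstring : List String) (out : List String × List String) : Prop := out = split_docstring_py_alt docstring
instance (docstring : List String) (out : List String × List String) : Decidable (Spec_split_docstring_py docstring out) := by unfold Spec_split_docstring_py; infer_instance

-- ===== CLAIM (what is proved, stated in full; the proofs are below) =====
def Claim_equal_split_docstring_py : Prop := ∀ (docstring : List String), Dom_split_docstring_py docstring → Spec_split_docstring_py docstring (split_docstring_py docstring)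

-- ===== LEMMAS AND PROOFS =====

-- abbreviation for A's loop body (proof-side only)
def pvStepA (st : List String × List String × Bool) (line : String) : List String × List String × Bool :=
  let found := st.2.2 || PySem.Str.startswith line ":"
  if found then (st.1, st.2.1 ++ [line], found)
  else (st.1 ++ [line], st.2.1, found)

theorem pvFoldA_true (l : List String) (d p : List String) :
    l.foldl pvStepA (d, p, true) = (d, p ++ l, true) := by
  induction l generalizing p with
  | nil => simp
  | cons a t ih => simp [pvStepA, ih]

theorem pvFoldA_false (l : List String) (d p : List String) :
    l.foldl pvStepA (d, p, false) =
      (d ++ l.take (l.findIdx (fun line => PySem.Str.startswith line ":")),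
       p ++ l.drop (l.findIdx (fun line => PySem.Str.startswith line ":")),
       l.any (fun line => PySem.Str.startswith line ":")) := by
  induction l generalizing d p with
  | nil => simp
  | cons a t ih =>
    by_cases h : PySem.Chars.startswith a.toList [':'] = true
    · simp [pvStepA, PySem.Str.startswith, h, pvFoldA_true, List.findIdx_cons]
    · have h' : PySem.Chars.startswith a.toList [':'] = false := Bool.eq_false_iff.mpr h
      rw [List.foldl_cons,
        show pvStepA (d, p, false) a = (d ++ [a], p, false) from by
          simp [pvStepA, PySem.Str.startswith, h'],
        ih]
      simp [List.findIdx_cons, PySem.Str.startswith, h']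

theorem split_docstring_py_spec' (docstring : List String) :
    split_docstring_py docstring = split_docstring_py_alt docstring := by
  have h : split_docstring_py docstring
      = ((docstring.foldl pvStepA ([], [], false)).1,
         (docstring.foldl pvStepA ([], [], false)).2.1) := rfl
  rw [h, pvFoldA_false]
  simp [split_docstring_py_alt]

-- ===== VERDICT (by name: the statement is the Claim_ definition above) =====
theorem split_docstring_py_spec : Claim_equal_split_docstring_py := by
  intro d _
  exact split_docstring_py_spec' d
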